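-- pv_equiv track=rewrite | github.com/MikeHug777/geometric-memory-ion-channels | calculations/burnside_orbit_topology.py | build_transition_graph
-- ===== SOURCE A (Python) =====
-- def hamming_distance(c1, c2):
--     """Number of positions where two configurations differ."""
--     return sum(a != b for a, b in zip(c1, c2))
--
-- def orbits_connected_by_single_flip(orbit1_configs, orbit2_configs):
--     """
--     Check if any configuration in orbit1 can reach any configuration in orbit2
--     by flipping exactly one spin.
--     """
--     for c1 in orbit1_configs:
--         for c2 in orbit2_configs:
--             if hamming_distance(c1, c2) == 1:
--                 return True
--     return False
--
-- def build_transition_graph(orbits):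
--     """
--     Build the transition graph between Burnside orbits.
--     Two orbits are connected if a single-spin-flip transforms one into the other.
--     """
--     orbit_keys = sorted(orbits.keys())
--     edges = []
--
--     for i in range(len(orbit_keys)):
--         for j in range(i+1, len(orbit_keys)):
--             if orbits_connected_by_single_flip(orbits[orbit_keys[i]], orbits[orbit_keys[j]]):
--                 edges.append((orbit_keys[i], orbit_keys[j]))
--
--     return orbit_keys, edges
-- ===== SOURCE B (Python) =====
-- def build_transition_graph(orbits):
--     """
--     Build the transition graph between Burnside orbits.
--     One pass over all config pairs collects the linked key pairs into a set;
--     the edges are then emitted by walking the sorted keys with membership tests.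
--     """
--     items = [(k, c) for k, cs in orbits.items() for c in cs]
--     linked = set()
--     for k1, c1 in items:
--         for k2, c2 in items:
--             if k1 < k2 and sum(x != y for x, y in zip(c1, c2)) == 1:
--                 linked.add((k1, k2))
--
--     keys = sorted(orbits)
--     edges = []
--     rest = keys
--     while rest:
--         a, rest = rest[0], rest[1:]
--         edges += [(a, b) for b in rest if (a, b) in linked]
--     return keys, edges
-- ===== Notes on version B (the rewrite author's own statement) =====
-- stated objective: alternative
-- what changed: Instead of running a separate any-config-pair existence scan for every one of the O(P^2) orbit-key pairs, B makes one pass over the flattened (key, config) pairs, collecting the linked key pairs into a set, and then emits the edges by a single walk over the sorted keys with set-membership tests.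
import Mathlib
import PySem

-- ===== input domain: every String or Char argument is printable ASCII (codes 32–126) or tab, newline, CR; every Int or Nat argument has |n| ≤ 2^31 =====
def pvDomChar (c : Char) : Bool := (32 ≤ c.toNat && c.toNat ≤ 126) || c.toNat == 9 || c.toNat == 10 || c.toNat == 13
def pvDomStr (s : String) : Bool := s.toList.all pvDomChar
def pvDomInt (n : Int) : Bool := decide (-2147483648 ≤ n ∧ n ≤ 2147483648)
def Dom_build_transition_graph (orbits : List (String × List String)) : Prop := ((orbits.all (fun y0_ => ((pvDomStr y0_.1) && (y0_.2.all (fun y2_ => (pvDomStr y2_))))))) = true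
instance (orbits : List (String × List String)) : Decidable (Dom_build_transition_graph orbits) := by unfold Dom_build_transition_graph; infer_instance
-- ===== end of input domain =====

-- B replaces A's per-orbit-pair existence scan by one pass over all config pairs that
-- collects the linked key pairs into a set, then emits edges by one walk over the
-- sorted keys with set-membership tests (objective: alternative; same results).

-- ===== PORT A =====
-- sum(a != b for a, b in zip(c1, c2))
def pvHamming (c1 c2 : String) : Int :=
  ((c1.toList.zip c2.toList).map (fun p => if p.1 ≠ p.2 then (1 : Int) else 0)).sum

-- orbits_connected_by_single_flip: the early-return double loop is an any/any
def pvConnected (l1 l2 : List String) : Bool :=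
  l1.any (fun c1 => l2.any (fun c2 => pvHamming c1 c2 == 1))

-- orbits[k]; every k looked up comes from orbits.keys(), so d[k] never raises and getD is exact
def pvGetItem (orbits : List (String × List String)) (k : String) : List String :=
  (PySem.Dict.mk orbits).getD k []

def build_transition_graph (orbits : List (String × List String)) :
    List String × (List (String × String)) :=
  let orbit_keys := PySem.List.sorted (PySem.Dict.mk orbits).keys (fun x => x) false
  let n : Int := (orbit_keys.length : Int)
  let edges := (PySem.List.pyRange 0 n).foldl (fun acc i =>
    (PySem.List.pyRange (i + 1) n).foldl (fun acc2 j =>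
      if pvConnected (pvGetItem orbits (PySem.List.pyGetD orbit_keys i ""))
                     (pvGetItem orbits (PySem.List.pyGetD orbit_keys j "")) then
        acc2 ++ [(PySem.List.pyGetD orbit_keys i "", PySem.List.pyGetD orbit_keys j "")]
      else acc2) acc) []
  (orbit_keys, edges)

-- ===== PORT B =====
-- linked = the set of key pairs (k1, k2), k1 < k2, joined by some Hamming-1 config pair
def pvLinked (items : List (String × String)) : PySem.Set (String × String) :=
  items.foldl (fun s q1 =>
    items.foldl (fun s2 q2 =>
      if decide (q1.1 < q2.1) &&
         (((q1.2.toList.zip q2.2.toList).map (fun p => if p.1 ≠ p.2 then (1 : Int) else 0)).sum == 1) then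
        PySem.Set.add s2 (q1.1, q2.1)
      else s2) s) PySem.Set.empty

-- emit(keys): [(a, b) for b in rest if (a, b) in linked] + emit(rest)
def pvEmit (linked : PySem.Set (String × String)) : List String → List (String × String)
  | [] => []
  | a :: rest =>
      (rest.filter (fun b => PySem.Set.contains linked (a, b))).map (fun b => (a, b)) ++
        pvEmit linked rest

def build_transition_graph_alt (orbits : List (String × List String)) :
    List String × (List (String × String)) :=
  let items := (PySem.Dict.mk orbits).items.flatMap (fun p => p.2.map (fun c => (p.1, c)))
  let linked := pvLinked items
  let ks := PySem.List.sorted (PySem.Dict.mk orbits).keys (fun x => x) false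
  (ks, pvEmit linked ks)

-- ===== PRECONDITION & SPEC =====
-- A's argument is a Python dict, whose keys are necessarily distinct; Pre_ only rules out
-- association lists with duplicate keys, which represent no dict input at all.
def Pre_build_transition_graph (orbits : List (String × List String)) : Prop :=
  (orbits.map (fun p => p.1)).Nodup
instance (orbits : List (String × List String)) : Decidable (Pre_build_transition_graph orbits) := by
  unfold Pre_build_transition_graph; infer_instance

def pvWitness_build_transition_graph : (List (String × List String)) :=
  [("a", ["00", "01"]), ("b", ["11"])]

def Spec_build_transition_graph (orbits : List (String × List String))
    (out : List String × (List (String × String))) : Prop :=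
  out = build_transition_graph_alt orbits
instance (orbits : List (String × List String)) (out : List String × (List (String × String))) :
    Decidable (Spec_build_transition_graph orbits out) := by
  unfold Spec_build_transition_graph; infer_instance

-- ===== CLAIM (what is proved, stated in full; the proofs are below) =====
def Claim_equal_build_transition_graph : Prop :=
  ∀ (orbits : List (String × List String)), Dom_build_transition_graph orbits →
    Pre_build_transition_graph orbits →
    Spec_build_transition_graph orbits (build_transition_graph orbits)

-- ===== LEMMAS AND PROOFS =====

-- membership in a conditional-insert fold over a set
theorem pv_mem_foldl {γ β : Type} (g : List β → γ → List β) (C : γ → β → Prop)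
    (hg : ∀ s q x, x ∈ g s q ↔ x ∈ s ∨ C q x) :
    ∀ (l : List γ) (s : List β) (x : β),
      x ∈ l.foldl g s ↔ x ∈ s ∨ ∃ q ∈ l, C q x := by
  intro l
  induction l with
  | nil => simp
  | cons q t ih =>
      intro s x
      simp only [List.foldl_cons, ih, hg, List.mem_cons]
      constructor
      · rintro ((h | h) | ⟨q', hq', h⟩)
        · exact Or.inl h
        · exact Or.inr ⟨q, Or.inl rfl, h⟩
        · exact Or.inr ⟨q', Or.inr hq', h⟩
      · rintro (h | ⟨q', (rfl | hq'), h⟩)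
        · exact Or.inl (Or.inl h)
        · exact Or.inl (Or.inr h)
        · exact Or.inr ⟨q', hq', h⟩

-- characterisation of pvLinked membership
theorem pv_mem_linked (items : List (String × String)) (x : String × String) :
    x ∈ pvLinked items ↔ ∃ q1 ∈ items, ∃ q2 ∈ items,
      (q1.1 < q2.1 ∧
        ((q1.2.toList.zip q2.2.toList).map (fun p => if p.1 ≠ p.2 then (1 : Int) else 0)).sum = 1) ∧
      x = (q1.1, q2.1) := by
  unfold pvLinked
  rw [pv_mem_foldl
    (C := fun q1 x => ∃ q2 ∈ items,
      (q1.1 < q2.1 ∧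
        ((q1.2.toList.zip q2.2.toList).map (fun p => if p.1 ≠ p.2 then (1 : Int) else 0)).sum = 1) ∧
      x = (q1.1, q2.1))]
  · simp [PySem.Set.empty]
  · intro s q1 x
    rw [pv_mem_foldl
      (C := fun q2 x =>
        (q1.1 < q2.1 ∧
          ((q1.2.toList.zip q2.2.toList).map (fun p => if p.1 ≠ p.2 then (1 : Int) else 0)).sum = 1) ∧
        x = (q1.1, q2.1))]
    intro s' q2 x'
    split_ifs with h
    · simp only [Bool.and_eq_true, decide_eq_true_eq, beq_iff_eq] at h
      rw [PySem.Set.mem_add]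
      tauto
    · simp only [Bool.and_eq_true, decide_eq_true_eq, beq_iff_eq] at h
      tauto

-- (pyRange m len).map (xs[j]) = xs.drop m
theorem pv_map_getD_range {α : Type} (xs : List α) (d : α) :
    ∀ (k m : Nat), xs.length ≤ m + k →
      (PySem.List.pyRange (m : Int) (xs.length : Int)).map
        (fun j => PySem.List.pyGetD xs j d) = xs.drop m := by
  intro k
  induction k with
  | zero =>
      intro m hm
      simp only [Nat.add_zero] at hm
      have h1 : PySem.List.pyRange (m : Int) (xs.length : Int) = [] := by
        rw [List.eq_nil_iff_forall_not_mem]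
        intro x hx
        rw [PySem.List.mem_pyRange_one] at hx
        omega
      rw [h1, List.drop_eq_nil_of_le hm]
      rfl
  | succ k ih =>
      intro m hm
      by_cases hlt : m < xs.length
      · have hcast : ((m : Int)) < (xs.length : Int) := by exact_mod_cast hlt
        rw [PySem.List.pyRange_one_cons hcast, List.map_cons, PySem.List.pyGetD_natCast,
          List.getD_eq_getElem xs d hlt]
        have : ((m : Int) + 1) = ((m + 1 : Nat) : Int) := by push_cast; ring
        rw [this, ih (m + 1) (by omega), List.drop_eq_getElem_cons hlt]
      · have h1 : PySem.List.pyRange (m : Int) (xs.length : Int) = [] := by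
          rw [List.eq_nil_iff_forall_not_mem]
          intro x hx
          rw [PySem.List.mem_pyRange_one] at hx
          omega
        rw [h1, List.drop_eq_nil_of_le (by omega)]
        rfl

-- flatMap respects pointwise-on-members equality
theorem pv_flatMap_congr {α β : Type} (l : List α) (f g : α → List β)
    (h : ∀ a ∈ l, f a = g a) : l.flatMap f = l.flatMap g := by
  induction l with
  | nil => rfl
  | cons x t ih =>
      simp only [List.flatMap_cons, h x (List.mem_cons_self), ih fun a ha => h a (List.mem_cons_of_mem _ ha)]

-- the index-range flatMap over (head, tail-after) pairs IS pvEmit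
theorem pv_emit_eq (linked : PySem.Set (String × String)) :
    ∀ xs : List String,
      (List.range xs.length).flatMap (fun m =>
        ((xs.drop (m + 1)).filter (fun b => PySem.Set.contains linked (xs.getD m "", b))).map
          (fun b => (xs.getD m "", b))) = pvEmit linked xs := by
  intro xs
  induction xs with
  | nil => simp [pvEmit]
  | cons a t ih =>
      rw [List.length_cons, List.range_succ_eq_map, List.flatMap_cons, List.flatMap_map]
      simp only [List.getD_cons_zero, List.drop_succ_cons, List.getD_cons_succ, List.drop_zero, pvEmit]
      rw [ih]

-- key present in the dict: lookup returns its configs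
theorem pv_getItem_eq (orbits : List (String × List String))
    (hnd : (orbits.map (fun p => p.1)).Nodup) {p : String × List String}
    (hp : p ∈ orbits) : pvGetItem orbits p.1 = p.2 := by
  unfold pvGetItem
  exact PySem.Dict.getD_of_mem_items (PySem.Dict.mk orbits) (k := p.1) (v := p.2)
    (by exact hp) (by exact hnd) []

-- the condition equivalence: connectivity of the two orbits = membership in linked
theorem pv_conn_eq_contains (orbits : List (String × List String))
    (hnd : (orbits.map (fun p => p.1)).Nodup) (a b : String)
    (ha : a ∈ orbits.map (fun p => p.1)) (hb : b ∈ orbits.map (fun p => p.1)) (hab : a < b) :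
    pvConnected (pvGetItem orbits a) (pvGetItem orbits b) =
      PySem.Set.contains
        (pvLinked ((PySem.Dict.mk orbits).items.flatMap (fun p => p.2.map (fun c => (p.1, c)))))
        (a, b) := by
  obtain ⟨pa, hpa, hpa1⟩ := List.mem_map.mp ha
  obtain ⟨pb, hpb, hpb1⟩ := List.mem_map.mp hb
  have hga : pvGetItem orbits a = pa.2 := hpa1 ▸ pv_getItem_eq orbits hnd hpa
  have hgb : pvGetItem orbits b = pb.2 := hpb1 ▸ pv_getItem_eq orbits hnd hpb
  have hitems : ∀ q : String × String,
      q ∈ (PySem.Dict.mk orbits).items.flatMap (fun p => p.2.map (fun c => (p.1, c))) ↔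
        ∃ p ∈ orbits, p.1 = q.1 ∧ q.2 ∈ p.2 := by
    intro q
    show q ∈ orbits.flatMap (fun p => p.2.map (fun c => (p.1, c))) ↔ _
    simp only [List.mem_flatMap, List.mem_map]
    constructor
    · rintro ⟨p, hp, c, hc, rfl⟩
      exact ⟨p, hp, rfl, hc⟩
    · rintro ⟨p, hp, h1, h2⟩
      exact ⟨p, hp, q.2, h2, by rw [h1]⟩
  rw [Bool.eq_iff_iff]
  unfold PySem.Set.contains
  rw [List.contains_iff_mem, pv_mem_linked]
  unfold pvConnected
  simp only [List.any_eq_true, beq_iff_eq]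
  constructor
  · rintro ⟨c1, hc1, c2, hc2, hham⟩
    refine ⟨(a, c1), (hitems (a, c1)).mpr ⟨pa, hpa, hpa1, hga ▸ hc1⟩,
            (b, c2), (hitems (b, c2)).mpr ⟨pb, hpb, hpb1, hgb ▸ hc2⟩, ⟨hab, ?_⟩, rfl⟩
    simpa [pvHamming] using hham
  · rintro ⟨q1, hq1, q2, hq2, ⟨hlt, hsum⟩, hx⟩
    obtain ⟨p1, hp1, hp11, hp12⟩ := (hitems q1).mp hq1
    obtain ⟨p2, hp2, hp21, hp22⟩ := (hitems q2).mp hq2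
    have hq1a : q1.1 = a := (congrArg Prod.fst hx).symm
    have hq2b : q2.1 = b := (congrArg Prod.snd hx).symm
    refine ⟨q1.2, ?_, q2.2, ?_, ?_⟩
    · rw [hga]
      have hk : pa.1 = p1.1 := by rw [hpa1, ← hq1a, ← hp11]
      have hpe : pa = p1 := List.inj_on_of_nodup_map hnd hpa hp1 hk
      rw [hpe]; exact hp12
    · rw [hgb]
      have hk : pb.1 = p2.1 := by rw [hpb1, ← hq2b, ← hp21]
      have hpe : pb = p2 := List.inj_on_of_nodup_map hnd hpb hp2 hk
      rw [hpe]; exact hp22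
    · simpa [pvHamming] using hsum

-- inner loop body in drop form
theorem pv_inner_eq (orbits : List (String × List String)) (keys : List String) (m : Nat) :
    ((PySem.List.pyRange ((m : Int) + 1) (keys.length : Int)).filter (fun j =>
        pvConnected (pvGetItem orbits (PySem.List.pyGetD keys (m : Int) ""))
                    (pvGetItem orbits (PySem.List.pyGetD keys j "")))).map
      (fun j => (PySem.List.pyGetD keys (m : Int) "", PySem.List.pyGetD keys j "")) =
    ((keys.drop (m + 1)).filter (fun b =>
        pvConnected (pvGetItem orbits (keys.getD m "")) (pvGetItem orbits b))).map
      (fun b => (keys.getD m "", b)) := by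
  simp only [PySem.List.pyGetD_natCast]
  have hc : ((m : Int) + 1) = ((m + 1 : Nat) : Int) := by push_cast; ring
  rw [hc, ← pv_map_getD_range keys "" keys.length (m + 1) (by omega),
    List.filter_map, List.map_map]
  rfl

-- ===== VERDICT (by name: the statement is the Claim_ definition above) =====
theorem build_transition_graph_spec : Claim_equal_build_transition_graph := by
  intro orbits _hdom hpre
  unfold Spec_build_transition_graph build_transition_graph build_transition_graph_alt
  dsimp only
  set keys := PySem.List.sorted (PySem.Dict.mk orbits).keys (fun x => x) false with hkeys
  have hperm : keys.Perm (orbits.map (fun p => p.1)) :=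
    PySem.List.sorted_perm (PySem.Dict.mk orbits).keys (fun x => x) false
  have hndk : keys.Nodup := hperm.nodup_iff.mpr hpre
  have hsortedk : keys.Pairwise (· ≤ ·) :=
    PySem.List.sorted_pairwise (PySem.Dict.mk orbits).keys (fun x => x)
  have hlt : keys.Pairwise (· < ·) :=
    (List.Pairwise.and hsortedk hndk).imp (fun h => lt_of_le_of_ne h.1 h.2)
  congr 1
  -- turn A's nested foldl into a flatMap of filtered maps
  have hf : (fun (acc : List (String × String)) (i : Int) =>
      (PySem.List.pyRange (i + 1) (keys.length : Int)).foldl (fun acc2 j =>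
        if pvConnected (pvGetItem orbits (PySem.List.pyGetD keys i ""))
                       (pvGetItem orbits (PySem.List.pyGetD keys j "")) then
          acc2 ++ [(PySem.List.pyGetD keys i "", PySem.List.pyGetD keys j "")]
        else acc2) acc) =
      (fun acc i => acc ++
        ((PySem.List.pyRange (i + 1) (keys.length : Int)).filter (fun j =>
            pvConnected (pvGetItem orbits (PySem.List.pyGetD keys i ""))
                        (pvGetItem orbits (PySem.List.pyGetD keys j "")))).map
          (fun j => (PySem.List.pyGetD keys i "", PySem.List.pyGetD keys j ""))) := by
    funext acc i
    exact PySem.List.foldl_append_if _ _ _ _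
  rw [hf, PySem.List.foldl_append_eq_flatMap, List.nil_append,
    PySem.List.pyRange_zero_natCast, List.flatMap_map]
  rw [pv_flatMap_congr _ _ _ (fun m _ => pv_inner_eq orbits keys m)]
  rw [pv_flatMap_congr (List.range keys.length)
    (g := fun m => ((keys.drop (m + 1)).filter (fun b =>
        PySem.Set.contains
          (pvLinked ((PySem.Dict.mk orbits).items.flatMap (fun p => p.2.map (fun c => (p.1, c)))))
          (keys.getD m "", b))).map (fun b => (keys.getD m "", b))) _ ?_]
  · exact pv_emit_eq _ keys
  · intro m hm
    have hmlen : m < keys.length := List.mem_range.mp hm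
    congr 1
    apply List.filter_congr
    intro b hb
    obtain ⟨t, ht, rfl⟩ := List.mem_iff_getElem.mp hb
    have hidx : m + 1 + t < keys.length := by
      have h' := ht; rw [List.length_drop] at h'; omega
    have hb2 : (keys.drop (m + 1))[t] = keys[m + 1 + t]'hidx := List.getElem_drop
    have ha : keys.getD m "" = keys[m] := List.getD_eq_getElem keys "" hmlen
    rw [hb2, ha]
    exact pv_conn_eq_contains orbits hpre keys[m] (keys[m + 1 + t]'hidx)
      (hperm.subset (List.getElem_mem hmlen))
      (hperm.subset (List.getElem_mem hidx))
      (List.pairwise_iff_getElem.mp hlt m (m + 1 + t) hmlen hidx (by omega))
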